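-- pv_equiv track=rewrite | github.com/gadihh/DNAStoralator | dnaSimulator/solqc/data/ipuac_toy/generation.py | generate_fasta_from_iupac
-- ===== SOURCE A (Python) =====
-- IUPAC = {
--         'A': 'A',
--         'C': 'C',
--         'G': 'G',
--         'T': 'T',
--         'R': 'AG',
--         'Y': 'CT',
--         'S': 'GC',
--         'W': 'AT',
--         'K': 'GT',
--         'M': 'AC',
--         'B': 'CGT',
--         'D': 'AGT',
--         'H': 'ACT',
--         'V': 'ACG',
--         'N': 'ACGT'
--     }
--
-- def char_array_to_string(c_array):
--     return ''.join(c_array)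
--
-- def generate_fasta_from_iupac(word):
--     variants = []
--     def extract_code(word, i):
--         if i == len(word):
--             variants.append(char_array_to_string(word))
--             return
--
--         for letter in IUPAC[word[i]]:
--             word[i] = letter
--             extract_code(word.copy(), i + 1)
--
--     extract_code(word, 0)
--     return variants
-- ===== SOURCE B (Python) =====
-- IUPAC = {
--         'A': 'A',
--         'C': 'C',
--         'G': 'G',
--         'T': 'T',
--         'R': 'AG',
--         'Y': 'CT',
--         'S': 'GC',
--         'W': 'AT',
--         'K': 'GT',
--         'M': 'AC',
--         'B': 'CGT',
--         'D': 'AGT',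
--         'H': 'ACT',
--         'V': 'ACG',
--         'N': 'ACGT'
--     }
--
--
-- def generate_fasta_from_iupac(word):
--     # Iterative prefix accumulation: extend every partial variant by each
--     # expansion letter of the next position (last position varies fastest,
--     # matching the recursive enumeration order).
--     variants = ['']
--     for c in word:
--         variants = [p + letter for p in variants for letter in IUPAC[c]]
--     return variants
-- ===== Notes on version B (the rewrite author's own statement) =====
-- stated objective: simpler
-- what changed: Replaces the recursive backtracking helper with a closure, list mutation and per-level list copies by a flat iterative prefix-accumulation loop (cartesian product built left to right); return value identical, but B does not reproduce A's side effect of mutating word[0].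
import Mathlib
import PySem

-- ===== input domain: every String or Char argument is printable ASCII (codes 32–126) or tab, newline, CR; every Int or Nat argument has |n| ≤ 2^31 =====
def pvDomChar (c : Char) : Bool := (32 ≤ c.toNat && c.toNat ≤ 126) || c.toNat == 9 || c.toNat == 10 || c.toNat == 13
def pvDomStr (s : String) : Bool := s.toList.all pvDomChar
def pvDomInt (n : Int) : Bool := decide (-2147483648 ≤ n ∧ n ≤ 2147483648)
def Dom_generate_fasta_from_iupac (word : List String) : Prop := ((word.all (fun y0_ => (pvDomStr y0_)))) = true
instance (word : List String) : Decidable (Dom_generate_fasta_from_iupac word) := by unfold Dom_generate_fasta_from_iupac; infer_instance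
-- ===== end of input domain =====

-- ===== PORT A =====
-- B changes only the enumeration strategy; return values agree. Note: the Python A
-- mutates word[0] in place (caller-visible); the equivalence proved here is about
-- the RETURN value only, B leaves the argument untouched.

-- the module-level IUPAC dict (shared by Source A and Source B)
def IUPAC : PySem.Dict String String := PySem.Dict.ofList
  [("A","A"),("C","C"),("G","G"),("T","T"),("R","AG"),("Y","CT"),("S","GC"),
   ("W","AT"),("K","GT"),("M","AC"),("B","CGT"),("D","AGT"),("H","ACT"),
   ("V","ACG"),("N","ACGT")]

-- char_array_to_string(c_array) = ''.join(c_array)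
def char_array_to_string (c_array : List String) : String :=
  PySem.Str.join "" c_array

-- the nested helper extract_code; the shared `variants` accumulator that each
-- recursive call extends becomes the returned list (loop: foldl_append_eq_flatMap
-- shape, written as flatMap). IUPAC[word[i]] with a missing key raises KeyError in
-- Python: Pre_ excludes those inputs, getD "" is the totality default there.
def extract_code (word : List String) (i : Nat) : List String :=
  if i = word.length then [char_array_to_string word]
  else if h : i < word.length then
    (PySem.Dict.getD IUPAC word[i] "").toList.flatMap (fun letter =>
      extract_code (word.set i (String.ofList [letter])) (i + 1))
  else []
termination_by word.length - i
decreasing_by simp [List.length_set]; omega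

def generate_fasta_from_iupac (word : List String) : List String :=
  extract_code word 0

-- ===== PORT B =====
def IUPAC_B : PySem.Dict String String := PySem.Dict.ofList
  [("A","A"),("C","C"),("G","G"),("T","T"),("R","AG"),("Y","CT"),("S","GC"),
   ("W","AT"),("K","GT"),("M","AC"),("B","CGT"),("D","AGT"),("H","ACT"),
   ("V","ACG"),("N","ACGT")]

def generate_fasta_from_iupac_alt (word : List String) : List String :=
  word.foldl
    (fun variants c =>
      variants.flatMap (fun p =>
        (PySem.Dict.getD IUPAC_B c "").toList.map (fun letter => p ++ String.ofList [letter])))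
    [""]

-- ===== PRECONDITION & SPEC =====
-- Pre_ excludes exactly the inputs on which Python raises KeyError: a word
-- containing a string that is not one of the 15 IUPAC code keys.
def Pre_generate_fasta_from_iupac (word : List String) : Prop :=
  ∀ s ∈ word, s ∈ (["A","C","G","T","R","Y","S","W","K","M","B","D","H","V","N"] : List String)
instance (word : List String) : Decidable (Pre_generate_fasta_from_iupac word) := by
  unfold Pre_generate_fasta_from_iupac; infer_instance
def pvWitness_generate_fasta_from_iupac : List String := ["N", "A", "R"]

def Spec_generate_fasta_from_iupac (word : List String) (out : List String) : Prop := out = generate_fasta_from_iupac_alt word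
instance (word : List String) (out : List String) : Decidable (Spec_generate_fasta_from_iupac word out) := by unfold Spec_generate_fasta_from_iupac; infer_instance

-- ===== CLAIM (what is proved, stated in full; the proofs are below) =====
def Claim_equal_generate_fasta_from_iupac : Prop := ∀ (word : List String), Dom_generate_fasta_from_iupac word → Pre_generate_fasta_from_iupac word → Spec_generate_fasta_from_iupac word (generate_fasta_from_iupac word)

-- ===== LEMMAS AND PROOFS =====

-- canonical cartesian product of the expansions of a word, as suffix char lists
def pvTails (word : List String) : List (List Char) :=
  match word with
  | [] => [[]]
  | c :: rest =>
    (PySem.Dict.getD IUPAC c "").toList.flatMap (fun l => (pvTails rest).map (l :: ·))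

theorem pvFlatten_intersperse_nil : ∀ (l : List (List Char)),
    (List.intersperse ([] : List Char) l).flatten = l.flatten
  | [] => by simp
  | [a] => by simp
  | a :: b :: t => by
      rw [show List.intersperse ([] : List Char) (a :: b :: t)
            = a :: [] :: List.intersperse [] (b :: t) from rfl]
      simp [pvFlatten_intersperse_nil (b :: t)]

theorem pvJoin_nil : char_array_to_string [] = "" := by
  rw [← String.toList_inj]
  simp [char_array_to_string, PySem.Str.join, PySem.Chars.join, List.intercalate]

theorem pvJoin_cons (s : String) (rest : List String) :
    char_array_to_string (s :: rest) = s ++ char_array_to_string rest := by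
  rw [← String.toList_inj]
  simp [char_array_to_string, PySem.Str.join, PySem.Chars.join, List.intercalate,
    pvFlatten_intersperse_nil]

theorem pvExtract_eq : ∀ (n : Nat) (w : List String) (i : Nat), w.length - i = n → i ≤ w.length →
    extract_code w i
      = (pvTails (w.drop i)).map (fun suf =>
          char_array_to_string (w.take i ++ suf.map (fun l => String.ofList [l])))
  | 0, w, i, hn, hle => by
      have hi : i = w.length := by omega
      subst hi
      rw [extract_code]
      simp [pvTails]
  | (n+1), w, i, hn, hle => by
      have hi : i < w.length := by omega
      rw [extract_code, if_neg (by omega), dif_pos hi]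
      have hIH : (fun letter => extract_code (w.set i (String.ofList [letter])) (i + 1))
          = (fun letter => (pvTails ((w.set i (String.ofList [letter])).drop (i + 1))).map
              (fun suf => char_array_to_string ((w.set i (String.ofList [letter])).take (i + 1)
                ++ suf.map (fun l => String.ofList [l])))) :=
        funext fun l => pvExtract_eq n _ _ (by simp; omega) (by simp; omega)
      rw [hIH, List.drop_eq_getElem_cons hi, pvTails]
      have htake : ∀ (s : String), (w.set i s).take (i + 1) = w.take i ++ [s] := fun s => by
        simp [List.set_eq_take_append_cons_drop, hi, List.take_append, List.length_take,
          min_eq_left (le_of_lt hi)]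
      simp only [htake, List.drop_set, List.map_flatMap, List.map_map]
      simp [Function.comp_def, List.append_assoc]

theorem pvIUPAC_B_eq : IUPAC_B = IUPAC := rfl

theorem pvAlt_eq (w : List String) : ∀ (ps : List String),
    w.foldl
      (fun variants c =>
        variants.flatMap (fun p =>
          (PySem.Dict.getD IUPAC_B c "").toList.map (fun letter => p ++ String.ofList [letter])))
      ps
      = ps.flatMap (fun p =>
          (pvTails w).map (fun suf => p ++ char_array_to_string (suf.map (fun l => String.ofList [l])))) := by
  induction w with
  | nil =>
      intro ps
      simp [pvTails, pvJoin_nil]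
  | cons c w ih =>
      intro ps
      rw [List.foldl_cons, ih, pvTails, pvIUPAC_B_eq]
      simp only [List.flatMap_assoc, List.flatMap_map, List.map_flatMap, List.map_map]
      simp [Function.comp_def, pvJoin_cons, String.append_assoc]

-- ===== VERDICT (by name: the statement is the Claim_ definition above) =====
theorem generate_fasta_from_iupac_spec : Claim_equal_generate_fasta_from_iupac := by
  intro word _ _
  unfold Spec_generate_fasta_from_iupac generate_fasta_from_iupac generate_fasta_from_iupac_alt
  rw [pvExtract_eq (word.length) word 0 (by omega) (by omega), pvAlt_eq]
  simp
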